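-- pv_equiv track=rewrite | github.com/Prachiarya20/DSA-Training | NSEL.py | nextSmallestElementLeft
-- ===== SOURCE A (Python) =====
-- from typing import List
--
-- def nextSmallestElementLeft(nums1: List[int], nums2: List[int]) -> List[int]:
--
--     ans = []
--
--     for i in range(0,len(nums1)):
--
--
--
--         for j in range(0,len(nums2)):
--
--
--
--             flag,val = 1,0
--
--             if nums1[i]==nums2[j]:
--
--                 val = nums2[j]
--
--
--
--                 for k in range(0,j):
--
--                     if nums2[k] < val:
--
--                         ans.append(nums2[k])
--
--                         flag = 0
--
--                         break
--
--
--
--                 if flag == 1: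
--
--                     ans.append(-1)
--
--     return ans
-- ===== SOURCE B (Python) =====
-- from typing import List
--
-- def nextSmallestElementLeft(nums1: List[int], nums2: List[int]) -> List[int]:
--     # Precompute, for every position of nums2, the leftmost strictly smaller
--     # element to its left (or -1); only the strictly decreasing list of prefix
--     # minima needs scanning.  Then emit the precomputed answers per nums1 query.
--     res2 = []
--     cand = []  # prefix minima of the scanned part, in order (strictly decreasing)
--     for v in nums2:
--         a = -1
--         for c in cand:
--             if c < v:
--                 a = c
--                 break
--         res2.append(a)
--         if not cand or v < cand[-1]:
--             cand.append(v)
--     out = []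
--     for x in nums1:
--         for v, a in zip(nums2, res2):
--             if v == x:
--                 out.append(a)
--     return out
-- ===== Notes on version B (the rewrite author's own statement) =====
-- stated objective: faster
-- what changed: Instead of rescanning the whole nums2 prefix for every (query, match) pair, B precomputes each position's leftmost smaller-to-the-left in one pass over nums2 (scanning only the strictly decreasing prefix-minima list), then emits the precomputed answers per nums1 query.
import Mathlib
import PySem

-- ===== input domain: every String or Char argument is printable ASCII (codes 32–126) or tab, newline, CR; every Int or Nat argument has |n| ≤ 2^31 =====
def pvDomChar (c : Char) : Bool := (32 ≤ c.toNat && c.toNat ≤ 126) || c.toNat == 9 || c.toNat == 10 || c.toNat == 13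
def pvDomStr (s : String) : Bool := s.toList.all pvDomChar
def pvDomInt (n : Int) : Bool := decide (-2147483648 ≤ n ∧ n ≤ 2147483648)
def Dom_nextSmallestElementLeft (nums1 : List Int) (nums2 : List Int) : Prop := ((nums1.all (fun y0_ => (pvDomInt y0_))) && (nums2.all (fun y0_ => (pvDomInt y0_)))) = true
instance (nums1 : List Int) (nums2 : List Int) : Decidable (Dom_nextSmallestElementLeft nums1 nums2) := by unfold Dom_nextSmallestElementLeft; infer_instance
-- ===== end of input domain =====

-- B replaces A's cubic rescan (for every match, rescan the whole nums2 prefix)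
-- by a one-pass precomputation of each position's leftmost-smaller-to-the-left
-- over the prefix-minima list, then emits precomputed answers per query (objective: faster).

-- ===== PORT A =====
-- inner 'for k in range(0, j)' loop with its break; returns (ans, flag)
def pvAKLoop (nums2 : List Int) (val : Int) (ks : List Int) (ans : List Int) :
    List Int × Int :=
  match ks with
  | [] => (ans, 1)
  | k :: rest =>
    if PySem.List.pyGetD nums2 k 0 < val then
      (ans ++ [PySem.List.pyGetD nums2 k 0], 0)
    else pvAKLoop nums2 val rest ans

-- body of the 'for j in …' loop for a fixed nums1[i] = x
def pvAJBody (nums2 : List Int) (x : Int) (ans : List Int) (j : Int) : List Int :=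
  if x = PySem.List.pyGetD nums2 j 0 then
    match pvAKLoop nums2 (PySem.List.pyGetD nums2 j 0) (PySem.List.pyRange 0 j) ans with
    | (ans, flag) => if flag = 1 then ans ++ [-1] else ans
  else ans

def nextSmallestElementLeft (nums1 : List Int) (nums2 : List Int) : List Int :=
  (PySem.List.pyRange 0 (PySem.List.len nums1)).foldl
    (fun ans i =>
      (PySem.List.pyRange 0 (PySem.List.len nums2)).foldl
        (pvAJBody nums2 (PySem.List.pyGetD nums1 i 0)) ans)
    []

-- ===== PORT B =====
-- 'for c in cand: if c < v: a = c; break' (a starts at -1)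
def pvBScan (cand : List Int) (v : Int) : Int :=
  match cand with
  | [] => -1
  | c :: rest => if c < v then c else pvBScan rest v

-- the first loop of Source B: state (res2, cand)
def pvBPre (nums2 : List Int) : List Int × List Int :=
  nums2.foldl
    (fun st v =>
      let a := pvBScan st.2 v
      (st.1 ++ [a],
       if st.2 = [] ∨ v < PySem.List.pyGetD st.2 (-1) 0 then st.2 ++ [v] else st.2))
    ([], [])

def nextSmallestElementLeft_alt (nums1 : List Int) (nums2 : List Int) : List Int :=
  let res2 := (pvBPre nums2).1
  nums1.foldl
    (fun out x =>
      (nums2.zip res2).foldl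
        (fun out p => if p.1 = x then out ++ [p.2] else out) out)
    []

-- ===== PRECONDITION & SPEC =====
def Spec_nextSmallestElementLeft (nums1 : List Int) (nums2 : List Int) (out : List Int) : Prop := out = nextSmallestElementLeft_alt nums1 nums2
instance (nums1 : List Int) (nums2 : List Int) (out : List Int) : Decidable (Spec_nextSmallestElementLeft nums1 nums2 out) := by unfold Spec_nextSmallestElementLeft; infer_instance

-- ===== CLAIM (what is proved, stated in full; the proofs are below) =====
def Claim_equal_nextSmallestElementLeft : Prop := ∀ (nums1 : List Int) (nums2 : List Int), Dom_nextSmallestElementLeft nums1 nums2 → Spec_nextSmallestElementLeft nums1 nums2 (nextSmallestElementLeft nums1 nums2)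

-- ===== LEMMAS AND PROOFS =====

-- the common value-level description: answer for value v after prefix `pre`
def pvLeft (pre : List Int) (v : Int) : Int :=
  (pre.find? (fun a => decide (a < v))).getD (-1)

-- per-position answers of nums2, with accumulated prefix `pre`
def pvRes : List Int → List Int → List Int
  | _, [] => []
  | pre, v :: t => pvLeft pre v :: pvRes (pre ++ [v]) t

-- what both programs emit for one query x
def pvMatch (nums2 res2 : List Int) (x : Int) : List Int :=
  ((nums2.zip res2).filter (fun p => decide (p.1 = x))).map (·.2)

-- ---------- B side ----------
theorem pvBScan_eq (cand : List Int) (v : Int) :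
    pvBScan cand v = (cand.find? (fun a => decide (a < v))).getD (-1) := by
  induction cand with
  | nil => rfl
  | cons c rest ih =>
    by_cases h : c < v <;> simp [pvBScan, List.find?, h, ih]

def pvInv (pre cand : List Int) : Prop :=
  (∀ v : Int, cand.find? (fun a => decide (a < v)) = pre.find? (fun a => decide (a < v))) ∧
  (match cand.getLast? with
   | none => pre = []
   | some m => ∀ a ∈ pre, m ≤ a)

theorem pvInv_step (pre cand : List Int) (v : Int) (h : pvInv pre cand) :
    pvInv (pre ++ [v])
      (if cand = [] ∨ v < PySem.List.pyGetD cand (-1) 0 then cand ++ [v] else cand) := by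
  obtain ⟨hf, hl⟩ := h
  by_cases hnil : cand = []
  · subst hnil
    simp only [List.getLast?_nil] at hl
    subst hl
    rw [if_pos (Or.inl rfl)]
    refine ⟨fun x => rfl, ?_⟩
    simp
  · set m := cand.getLast hnil with hmdef
    have hm : cand.getLast? = some m := List.getLast?_eq_some_getLast hnil
    rw [hm] at hl
    rw [PySem.List.pyGetD_neg_one cand 0 hnil, ← hmdef]
    by_cases hv : v < m
    · rw [if_pos (Or.inr hv)]
      refine ⟨fun x => by rw [List.find?_append, List.find?_append, hf], ?_⟩
      simp only [List.getLast?_append, List.getLast?_singleton, Option.some_or]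
      intro a ha
      rcases List.mem_append.mp ha with h1 | h1
      · exact le_trans (le_of_lt hv) (hl a h1)
      · simp at h1; omega
    · rw [if_neg (by push Not; exact ⟨hnil, not_lt.mp hv⟩)]
      refine ⟨?_, ?_⟩
      · intro x
        rw [List.find?_append, hf]
        cases hp : pre.find? (fun a => decide (a < x)) with
        | some c => simp
        | none =>
          simp only [Option.none_or]
          have hcand : cand.find? (fun a => decide (a < x)) = none := by rw [hf, hp]
          have hmx : ¬ (m < x) := by
            have := List.find?_eq_none.mp hcand m (List.getLast_mem hnil)
            simpa using this
          have hvx : ¬ (v < x) := by omega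
          simp [hvx]
      · rw [hm]
        intro a ha
        rcases List.mem_append.mp ha with h1 | h1
        · exact hl a h1
        · simp at h1; omega

theorem pvBScan_inv (pre cand : List Int) (v : Int) (h : pvInv pre cand) :
    pvBScan cand v = pvLeft pre v := by
  rw [pvBScan_eq, pvLeft, h.1]

theorem pvBPre_go (rest pre cand res : List Int) (h : pvInv pre cand) :
    (rest.foldl
      (fun st v =>
        let a := pvBScan st.2 v
        (st.1 ++ [a],
         if st.2 = [] ∨ v < PySem.List.pyGetD st.2 (-1) 0 then st.2 ++ [v] else st.2))
      (res, cand)).1 = res ++ pvRes pre rest := by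
  induction rest generalizing pre cand res with
  | nil => simp [pvRes]
  | cons v t ih =>
    simp only [List.foldl_cons, pvRes]
    rw [ih (pre ++ [v]) _ _ (pvInv_step pre cand v h)]
    simp [pvBScan_inv pre cand v h]

theorem pvBPre_eq (nums2 : List Int) : (pvBPre nums2).1 = pvRes [] nums2 := by
  have := pvBPre_go nums2 [] [] [] ⟨fun v => rfl, by simp⟩
  simpa [pvBPre] using this

theorem pvB_eq (nums1 nums2 : List Int) :
    nextSmallestElementLeft_alt nums1 nums2
      = nums1.flatMap (pvMatch nums2 (pvRes [] nums2)) := by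
  unfold nextSmallestElementLeft_alt
  rw [pvBPre_eq]
  have h : ∀ (out : List Int) (x : Int),
      (nums2.zip (pvRes [] nums2)).foldl
        (fun out p => if p.1 = x then out ++ [p.2] else out) out
        = out ++ pvMatch nums2 (pvRes [] nums2) x := by
    intro out x
    simpa [pvMatch] using
      PySem.List.foldl_append_if (fun p : Int × Int => decide (p.1 = x)) (·.2)
        (nums2.zip (pvRes [] nums2)) out
  calc nums1.foldl
        (fun out x => (nums2.zip (pvRes [] nums2)).foldl
          (fun out p => if p.1 = x then out ++ [p.2] else out) out) []
      = nums1.foldl (fun out x => out ++ pvMatch nums2 (pvRes [] nums2) x) [] := by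
        exact PySem.List.foldl_congr_mem _ _ _ _ (fun acc x _ => h acc x)
    _ = nums1.flatMap (pvMatch nums2 (pvRes [] nums2)) := by
        simpa using PySem.List.foldl_append_eq_flatMap (pvMatch nums2 (pvRes [] nums2)) nums1 []

-- ---------- A side ----------
theorem pvAKLoop_eq (nums2 : List Int) (val : Int) (ks ans : List Int) :
    pvAKLoop nums2 val ks ans
      = match (ks.map (fun k => PySem.List.pyGetD nums2 k 0)).find?
            (fun a => decide (a < val)) with
        | some c => (ans ++ [c], 0)
        | none => (ans, 1) := by
  induction ks with
  | nil => rfl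
  | cons k rest ih =>
    by_cases h : PySem.List.pyGetD nums2 k 0 < val <;>
      simp [pvAKLoop, h, ih]

theorem pvRange_map_take (nums2 : List Int) (j : Nat) (hj : j ≤ nums2.length) :
    (PySem.List.pyRange 0 (j : Int)).map (fun k => PySem.List.pyGetD nums2 k 0)
      = nums2.take j := by
  rw [PySem.List.pyRange_one]
  simp only [List.map_map, Int.sub_zero, Int.toNat_natCast]
  rw [show ((fun k => PySem.List.pyGetD nums2 k 0) ∘ fun k : Nat => (0:Int) + ↑k)
      = (fun k : Nat => nums2.getD k 0) from funext fun k => by simp]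
  apply List.ext_getElem
  · simp [hj]
  · intro i h1 h2
    simp only [List.getElem_map, List.getElem_range, List.getElem_take]
    exact List.getD_eq_getElem nums2 0 (by simp at h2; omega)

theorem pvRes_append (l1 l2 pre : List Int) :
    pvRes pre (l1 ++ l2) = pvRes pre l1 ++ pvRes (pre ++ l1) l2 := by
  induction l1 generalizing pre with
  | nil => simp [pvRes]
  | cons a t ih => simp [pvRes, ih]

theorem pvRes_length (l pre : List Int) : (pvRes pre l).length = l.length := by
  induction l generalizing pre with
  | nil => rfl
  | cons a t ih => simp [pvRes, ih]

theorem pvAJBody_eq (nums2 : List Int) (j : Nat) (hj : j < nums2.length)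
    (x : Int) (ans : List Int) :
    pvAJBody nums2 x ans (j : Int)
      = if x = nums2.getD j 0 then
          ans ++ [pvLeft (nums2.take j) (nums2.getD j 0)]
        else ans := by
  unfold pvAJBody
  rw [PySem.List.pyGetD_natCast]
  by_cases h : x = nums2.getD j 0
  · rw [if_pos h, if_pos h]
    rw [pvAKLoop_eq, pvRange_map_take nums2 j (le_of_lt hj)]
    unfold pvLeft
    cases (nums2.take j).find? (fun a => decide (a < nums2.getD j 0)) with
    | some c => simp
    | none => simp
  · rw [if_neg h, if_neg h]

theorem pvVal_eq (nums2 : List Int) (x : Int) : ∀ ans : List Int,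
    (List.range nums2.length).foldl
      (fun ans j => if x = nums2.getD j 0 then
          ans ++ [pvLeft (nums2.take j) (nums2.getD j 0)] else ans) ans
      = ans ++ pvMatch nums2 (pvRes [] nums2) x := by
  induction nums2 using List.reverseRecOn with
  | nil => intro ans; simp [pvMatch, pvRes]
  | append_singleton t v ih =>
    intro ans
    have hlen : (t ++ [v]).length = t.length + 1 := by simp
    rw [hlen, List.range_succ, List.foldl_append]
    have hcong :
        (List.range t.length).foldl
          (fun ans j => if x = (t ++ [v]).getD j 0 then
              ans ++ [pvLeft ((t ++ [v]).take j) ((t ++ [v]).getD j 0)] else ans) ans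
          = (List.range t.length).foldl
          (fun ans j => if x = t.getD j 0 then
              ans ++ [pvLeft (t.take j) (t.getD j 0)] else ans) ans := by
      apply PySem.List.foldl_congr_mem
      intro acc j hjmem
      have hj : j < t.length := List.mem_range.mp hjmem
      rw [List.getD_append t [v] 0 j hj,
        List.take_append_of_le_length (le_of_lt hj)]
    rw [hcong, ih]
    have hgv : (t ++ [v]).getD t.length 0 = v := by
      rw [List.getD_eq_getElem _ _ (by simp)]; simp
    have htk : (t ++ [v]).take t.length = t := by
      rw [List.take_append_of_le_length le_rfl, List.take_length]
    have hres : pvRes [] (t ++ [v]) = pvRes [] t ++ [pvLeft t v] := by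
      rw [pvRes_append]; simp [pvRes]
    have hzip : (t ++ [v]).zip (pvRes [] t ++ [pvLeft t v])
        = t.zip (pvRes [] t) ++ [(v, pvLeft t v)] := by
      rw [List.zip_append (by rw [pvRes_length])]
      rfl
    simp only [List.foldl_cons, List.foldl_nil, hgv, htk, hres]
    unfold pvMatch
    rw [hzip, List.filter_append, List.map_append]
    by_cases hxv : x = v
    · subst hxv
      simp
    · have : ¬ (v = x) := fun h => hxv h.symm
      simp [hxv, this]

theorem pvA_eq (nums1 nums2 : List Int) :
    nextSmallestElementLeft nums1 nums2
      = nums1.flatMap (pvMatch nums2 (pvRes [] nums2)) := by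
  unfold nextSmallestElementLeft
  rw [PySem.List.foldl_pyRange_zero_pyGetD nums1 0
    (fun ans x => (PySem.List.pyRange 0 (PySem.List.len nums2)).foldl (pvAJBody nums2 x) ans) []]
  have hinner : ∀ (x : Int) (ans : List Int),
      (PySem.List.pyRange 0 (PySem.List.len nums2)).foldl (pvAJBody nums2 x) ans
        = ans ++ pvMatch nums2 (pvRes [] nums2) x := by
    intro x ans
    rw [show PySem.List.pyRange 0 (PySem.List.len nums2)
        = (List.range nums2.length).map (fun k : Nat => (k : Int)) from by
      rw [PySem.List.pyRange_one]; simp [PySem.List.len]]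
    rw [List.foldl_map]
    have hcong :
        (List.range nums2.length).foldl (fun acc (k : Nat) => pvAJBody nums2 x acc (k : Int)) ans
          = (List.range nums2.length).foldl
            (fun ans j => if x = nums2.getD j 0 then
                ans ++ [pvLeft (nums2.take j) (nums2.getD j 0)] else ans) ans := by
      apply PySem.List.foldl_congr_mem
      intro acc j hjmem
      rw [pvAJBody_eq nums2 j (List.mem_range.mp hjmem)]
    rw [hcong, pvVal_eq]
  calc nums1.foldl
        (fun ans x => (PySem.List.pyRange 0 (PySem.List.len nums2)).foldl (pvAJBody nums2 x) ans) []
      = nums1.foldl (fun ans x => ans ++ pvMatch nums2 (pvRes [] nums2) x) [] :=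
        PySem.List.foldl_congr_mem _ _ _ _ (fun acc x _ => hinner x acc)
    _ = nums1.flatMap (pvMatch nums2 (pvRes [] nums2)) := by
        simpa using PySem.List.foldl_append_eq_flatMap (pvMatch nums2 (pvRes [] nums2)) nums1 []

-- ===== VERDICT (by name: the statement is the Claim_ definition above) =====
theorem nextSmallestElementLeft_spec : Claim_equal_nextSmallestElementLeft := by
  intro nums1 nums2 _
  unfold Spec_nextSmallestElementLeft
  rw [pvA_eq, pvB_eq]
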